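-- pv_equiv track=rewrite | github.com/ewen177/python | Test sécurité mots de passes/Test sécurité mots de passes.py | contains_dictionary_word
-- ===== SOURCE A (Python) =====
-- from typing import List, Tuple
--
-- LEET_MAP = str.maketrans({
--     '0': 'o', '1': 'l', '3': 'e', '4': 'a', '5': 's', '7': 't', '@': 'a',
--     '$': 's', '+': 't', '8': 'b', '9': 'g', '2': 'z'
-- })
--
-- def leet_normalize(s: str) -> str:
--     return s.translate(LEET_MAP)
--
-- def contains_dictionary_word(password: str, dictset:set, min_len=4) -> Tuple[bool, List[str]]:
--     lowered = password.lower()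
--     leeted = leet_normalize(lowered)
--     found = []
--     for w in dictset:
--         if len(w) < min_len:
--             continue
--         if w in lowered or w in leeted:
--             found.append(w)
--     return (len(found) > 0), found
-- ===== SOURCE B (Python) =====
-- from typing import List, Tuple
--
-- LEET_MAP = str.maketrans({
--     '0': 'o', '1': 'l', '3': 'e', '4': 'a', '5': 's', '7': 't', '@': 'a',
--     '$': 's', '+': 't', '8': 'b', '9': 'g', '2': 'z'
-- })
--
-- def leet_normalize(s: str) -> str:
--     return s.translate(LEET_MAP)
--
-- def contains_dictionary_word(password: str, dictset: set, min_len=4) -> Tuple[bool, List[str]]: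
--     lowered = password.lower()
--     leeted = leet_normalize(lowered)
--     # index once: every substring of either normalised form whose length is the
--     # length of some admissible dictionary word, then one hash lookup per word
--     lengths = {len(w) for w in dictset if len(w) >= min_len}
--     subs = {s[i:i + L] for s in (lowered, leeted)
--                        for L in lengths
--                        for i in range(len(s) - L + 1)}
--     found = [w for w in dictset if len(w) >= min_len and w in subs]
--     return (len(found) > 0), found
-- ===== Notes on version B (the rewrite author's own statement) =====
-- stated objective: alternative
-- what changed: B builds one set of all password substrings whose lengths occur among admissible dictionary words and filters the dictionary with a single hash-set membership test per word, instead of running a substring search over both normalised passwords for every dictionary word.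
import Mathlib
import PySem

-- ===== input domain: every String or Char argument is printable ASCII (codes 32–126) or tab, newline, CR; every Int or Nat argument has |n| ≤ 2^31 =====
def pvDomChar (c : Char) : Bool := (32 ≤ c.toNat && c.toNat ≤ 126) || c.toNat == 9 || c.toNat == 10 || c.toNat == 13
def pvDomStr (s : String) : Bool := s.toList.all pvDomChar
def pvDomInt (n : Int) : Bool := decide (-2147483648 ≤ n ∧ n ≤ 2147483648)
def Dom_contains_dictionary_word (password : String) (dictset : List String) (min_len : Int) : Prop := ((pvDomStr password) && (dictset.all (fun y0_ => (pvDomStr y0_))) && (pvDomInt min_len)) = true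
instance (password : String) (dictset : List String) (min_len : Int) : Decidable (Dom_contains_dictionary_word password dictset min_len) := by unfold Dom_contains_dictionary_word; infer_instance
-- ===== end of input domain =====

-- B indexes all password substrings of the admissible dictionary word lengths into one set
-- and filters the dictionary by a single membership test per word (alternative algorithm).


-- ===== PORT A =====
-- module helper LEET_MAP / leet_normalize (character translation table), shared by both ports
def leetChar (c : Char) : Char :=
  if c = '0' then 'o' else if c = '1' then 'l' else if c = '3' then 'e'
  else if c = '4' then 'a' else if c = '5' then 's' else if c = '7' then 't'
  else if c = '@' then 'a' else if c = '$' then 's' else if c = '+' then 't'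
  else if c = '8' then 'b' else if c = '9' then 'g' else if c = '2' then 'z' else c

def leet_normalize (s : String) : String := String.ofList (s.toList.map leetChar)

def contains_dictionary_word (password : String) (dictset : List String) (min_len : Int) : Bool × List String :=
  let lowered := PySem.Str.lower password
  let leeted := leet_normalize lowered
  let found := dictset.foldl (fun acc w =>
      if PySem.Str.len w < min_len then acc
      else if PySem.Str.isIn w lowered || PySem.Str.isIn w leeted then acc ++ [w]
      else acc) []
  (decide (found.length > 0), found)

-- ===== PORT B =====
-- the substrings s[i:i+L] of s, as the inner comprehension of Source B enumerates them
def pvSubsLen (s : String) (L : Int) : List (List Char) :=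
  (PySem.List.pyRange 0 (PySem.Str.len s - L + 1) 1).map
    (fun i => PySem.List.slice s.toList (some i) (some (i + L)))

def contains_dictionary_word_alt (password : String) (dictset : List String) (min_len : Int) : Bool × List String :=
  let lowered := PySem.Str.lower password
  let leeted := leet_normalize lowered
  let lengths : PySem.Set Int :=
    PySem.Set.ofList ((dictset.filter (fun w => min_len ≤ PySem.Str.len w)).map (fun w => PySem.Str.len w))
  let subs : PySem.Set (List Char) :=
    PySem.Set.ofList ([lowered, leeted].flatMap (fun s => lengths.flatMap (fun L => pvSubsLen s L)))
  let found := dictset.filter (fun w => min_len ≤ PySem.Str.len w && PySem.Set.contains subs w.toList)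
  (decide (found.length > 0), found)

-- ===== PRECONDITION & SPEC =====
def Spec_contains_dictionary_word (password : String) (dictset : List String) (min_len : Int) (out : Bool × List String) : Prop := out = contains_dictionary_word_alt password dictset min_len
instance (password : String) (dictset : List String) (min_len : Int) (out : Bool × List String) : Decidable (Spec_contains_dictionary_word password dictset min_len out) := by unfold Spec_contains_dictionary_word; infer_instance

-- ===== CLAIM (what is proved, stated in full; the proofs are below) =====
def Claim_equal_contains_dictionary_word : Prop := ∀ (password : String) (dictset : List String) (min_len : Int), Dom_contains_dictionary_word password dictset min_len → Spec_contains_dictionary_word password dictset min_len (contains_dictionary_word password dictset min_len)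

-- ===== LEMMAS AND PROOFS =====

-- the enumerated substrings of length L are exactly the infixes of that length
theorem mem_pvSubsLen (s : String) (L : Int) (hL : 0 ≤ L) (t : List Char) :
    t ∈ pvSubsLen s L ↔ t <:+: s.toList ∧ (t.length : Int) = L := by
  have hl : PySem.Str.len s = (s.toList.length : Int) := by simp [PySem.Str.len_eq]
  unfold pvSubsLen
  simp only [List.mem_map, PySem.List.mem_pyRange_one]
  constructor
  · rintro ⟨i, ⟨hi0, hiub⟩, rfl⟩
    rw [hl] at hiub
    have hi : i = ((i.toNat : Nat) : Int) := (Int.toNat_of_nonneg hi0).symm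
    have hLn : L = ((L.toNat : Nat) : Int) := (Int.toNat_of_nonneg hL).symm
    have hfit : i.toNat + L.toNat ≤ s.toList.length := by omega
    rw [hi, hLn, show ((i.toNat : Int) + (L.toNat : Int)) = (((i.toNat + L.toNat : Nat) : Nat) : Int) by push_cast; ring,
       PySem.List.slice_natCast]
    constructor
    · exact (List.take_prefix _ _).isInfix.trans (List.drop_suffix _ _).isInfix
    · simp only [List.length_take, List.length_drop]
      omega
  · rintro ⟨⟨pre, suf, h⟩, hlen⟩
    have hsum : s.toList.length = pre.length + t.length + suf.length := by
      rw [← h]; simp; omega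
    refine ⟨(pre.length : Int), ⟨by positivity, by rw [hl]; omega⟩, ?_⟩
    rw [show ((pre.length : Int) + L) = (((pre.length + t.length : Nat) : Nat) : Int) by push_cast; omega,
       show ((pre.length : Int)) = (((pre.length : Nat) : Nat) : Int) from rfl,
       PySem.List.slice_natCast, ← h]
    rw [List.append_assoc, List.drop_left]
    simp

-- a fold that conditionally appends is a filter
theorem pvFoldlFilter {α : Type} (p : α → Bool) (l : List α) (acc : List α) :
    l.foldl (fun acc x => if p x then acc ++ [x] else acc) acc = acc ++ l.filter p := by
  induction l generalizing acc with
  | nil => simp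
  | cons x xs ih => by_cases h : p x <;> simp [h, ih]

-- ===== VERDICT (by name: the statement is the Claim_ definition above) =====
theorem contains_dictionary_word_spec : Claim_equal_contains_dictionary_word := by
  intro password dictset min_len _
  unfold Spec_contains_dictionary_word contains_dictionary_word contains_dictionary_word_alt
  simp only
  have hfun : (fun (acc : List String) w =>
      if PySem.Str.len w < min_len then acc
      else if PySem.Str.isIn w (PySem.Str.lower password) || PySem.Str.isIn w (leet_normalize (PySem.Str.lower password)) then acc ++ [w]
      else acc)
      = (fun (acc : List String) w =>
        if (min_len ≤ PySem.Str.len w &&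
            (PySem.Str.isIn w (PySem.Str.lower password) || PySem.Str.isIn w (leet_normalize (PySem.Str.lower password)))) then acc ++ [w] else acc) := by
    funext acc w
    by_cases h1 : PySem.Str.len w < min_len
    · rw [if_pos h1]
      have hd : decide (min_len ≤ PySem.Str.len w) = false := decide_eq_false (by omega)
      simp only [hd, Bool.false_and, Bool.false_eq_true, if_false]
    · rw [if_neg h1]
      have hd : decide (min_len ≤ PySem.Str.len w) = true := decide_eq_true (by omega)
      simp only [hd, Bool.true_and]
  rw [hfun, pvFoldlFilter, List.nil_append]
  refine congrArg (fun l : List String => (decide (l.length > 0), l)) ?_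
  refine List.filter_congr ?_
  intro w hw
  by_cases hm : min_len ≤ PySem.Str.len w
  · have hd : decide (min_len ≤ PySem.Str.len w) = true := decide_eq_true hm
    simp only [hd, Bool.true_and]
    rw [Bool.eq_iff_iff, Bool.or_eq_true, PySem.Str.isIn_iff_infix, PySem.Str.isIn_iff_infix,
       PySem.Set.contains_iff, PySem.Set.mem_ofList, List.mem_flatMap]
    have hwlen : PySem.Str.len w = (w.toList.length : Int) := by simp [PySem.Str.len_eq]
    have hmemlen : (PySem.Str.len w) ∈
        (PySem.Set.ofList ((dictset.filter (fun w => min_len ≤ PySem.Str.len w)).map (fun w => PySem.Str.len w)) : PySem.Set Int) := by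
      rw [PySem.Set.mem_ofList, List.mem_map]
      exact ⟨w, List.mem_filter.mpr ⟨hw, hd⟩, rfl⟩
    have hside : ∀ side : String, (w.toList <:+: side.toList ↔
        ∃ L ∈ (PySem.Set.ofList ((dictset.filter (fun w => min_len ≤ PySem.Str.len w)).map (fun w => PySem.Str.len w)) : PySem.Set Int),
          w.toList ∈ pvSubsLen side L) := by
      intro side
      constructor
      · intro hin
        refine ⟨PySem.Str.len w, hmemlen, ?_⟩
        rw [mem_pvSubsLen side _ (by omega) w.toList]
        exact ⟨hin, hwlen.symm⟩
      · rintro ⟨L, hLmem, hmem⟩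
        have hL0 : 0 ≤ L := by
          rw [PySem.Set.mem_ofList, List.mem_map] at hLmem
          obtain ⟨u, _, rfl⟩ := hLmem
          have : PySem.Str.len u = (u.toList.length : Int) := by simp [PySem.Str.len_eq]
          omega
        exact ((mem_pvSubsLen side L hL0 w.toList).mp hmem).1
    constructor
    · rintro (h | h)
      · exact ⟨PySem.Str.lower password, by simp, List.mem_flatMap.mpr ((hside _).mp h)⟩
      · exact ⟨leet_normalize (PySem.Str.lower password), by simp, List.mem_flatMap.mpr ((hside _).mp h)⟩
    · rintro ⟨side, hsides, hmemflat⟩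
      simp only [List.mem_cons, List.not_mem_nil, or_false] at hsides
      rcases hsides with rfl | rfl
      · exact Or.inl ((hside _).mpr (List.mem_flatMap.mp hmemflat))
      · exact Or.inr ((hside _).mpr (List.mem_flatMap.mp hmemflat))
  · have hd : decide (min_len ≤ PySem.Str.len w) = false := decide_eq_false hm
    simp only [hd, Bool.false_and]
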